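-- pv_equiv track=rewrite | github.com/Romariozh/QA_Automation_22 | HW6/HomeWork_6.py | determ_age_in_str
-- ===== SOURCE A (Python) =====
-- def determ_age_in_str(age_string: int) -> str:
--     """
--     The function determines the age and returns a string describing the age like 'рік', 'роки', 'років'
--     """
--     gradient_str_age = {
--         'рік': (1, 1),
--         'роки': (2, 3, 4),
--     }
--     string_add_age = 'років'
--     for key in gradient_str_age.keys():
--         if age_string % 10 in gradient_str_age[key] and age_string not in (11, 12, 13, 14):
--             string_add_age = key
--             break
--     return string_add_age
-- ===== SOURCE B (Python) =====
-- def determ_age_in_str(age_string: int) -> str: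
--     if age_string in (11, 12, 13, 14):
--         return 'років'
--     last = age_string % 10
--     if last == 1:
--         return 'рік'
--     if last in (2, 3, 4):
--         return 'роки'
--     return 'років'
-- ===== Notes on version B (the rewrite author's own statement) =====
-- stated objective: simpler
-- what changed: Replaces the dict of digit tuples and the key-scanning loop with a flat if/elif cascade on the last decimal digit computed once, maintaining no container.
import Mathlib
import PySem

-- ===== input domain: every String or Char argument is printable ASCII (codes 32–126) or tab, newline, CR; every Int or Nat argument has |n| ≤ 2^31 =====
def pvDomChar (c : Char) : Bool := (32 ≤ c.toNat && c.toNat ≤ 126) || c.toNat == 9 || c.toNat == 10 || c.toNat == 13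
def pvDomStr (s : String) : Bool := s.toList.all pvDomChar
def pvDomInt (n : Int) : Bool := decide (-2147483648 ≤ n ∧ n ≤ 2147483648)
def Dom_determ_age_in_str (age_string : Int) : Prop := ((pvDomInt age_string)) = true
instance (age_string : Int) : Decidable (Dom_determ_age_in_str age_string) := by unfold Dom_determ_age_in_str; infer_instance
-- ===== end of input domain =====

-- B replaces the dict+key-loop with a flat if/elif cascade on age % 10 (simpler, no container).


-- ===== PORT A =====
-- loop over the dict's keys in insertion order, with break semantics
def determ_age_loop (age_string : Int) (d : PySem.Dict String (List Int)) (keys : List String) : String :=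
  match keys with
  | [] => "років"
  | key :: rest =>
      if (d.getD key []).contains (PySem.Int.mod age_string 10)
         && !([11, 12, 13, 14] : List Int).contains age_string then
        key
      else
        determ_age_loop age_string d rest

def determ_age_in_str (age_string : Int) : String :=
  let gradient_str_age : PySem.Dict String (List Int) :=
    (PySem.Dict.empty.insert "рік" [1, 1]).insert "роки" [2, 3, 4]
  determ_age_loop age_string gradient_str_age gradient_str_age.keys

-- ===== PORT B =====
def determ_age_in_str_alt (age_string : Int) : String :=
  if ([11, 12, 13, 14] : List Int).contains age_string then "років"
  else
    let last := PySem.Int.mod age_string 10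
    if last = 1 then "рік"
    else if ([2, 3, 4] : List Int).contains last then "роки"
    else "років"

-- ===== PRECONDITION & SPEC =====
def Spec_determ_age_in_str (age_string : Int) (out : String) : Prop := out = determ_age_in_str_alt age_string
instance (age_string : Int) (out : String) : Decidable (Spec_determ_age_in_str age_string out) := by unfold Spec_determ_age_in_str; infer_instance

-- ===== CLAIM (what is proved, stated in full; the proofs are below) =====
def Claim_equal_determ_age_in_str : Prop := ∀ (age_string : Int), Dom_determ_age_in_str age_string → Spec_determ_age_in_str age_string (determ_age_in_str age_string)

-- ===== LEMMAS AND PROOFS =====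

-- ===== VERDICT (by name: the statement is the Claim_ definition above) =====
theorem determ_age_in_str_spec : Claim_equal_determ_age_in_str := by
  intro age _
  unfold Spec_determ_age_in_str determ_age_in_str determ_age_in_str_alt
  by_cases h : age = 11 ∨ age = 12 ∨ age = 13 ∨ age = 14
  · rcases h with h | h | h | h <;> subst h <;>
      simp [determ_age_loop, PySem.Dict.keys, PySem.Dict.getD, PySem.Dict.get?,
        PySem.Dict.empty, PySem.Dict.insert]
  · push_neg at h
    obtain ⟨h1, h2, h3, h4⟩ := h
    simp [determ_age_loop, PySem.Dict.keys, PySem.Dict.getD, PySem.Dict.get?,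
      PySem.Dict.empty, PySem.Dict.insert, h1, h2, h3, h4]
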